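-- pv_equiv track=rewrite | github.com/NU-Formula-Racing/daq-interface-26 | python/gui.py | _find_time_column
-- ===== SOURCE A (Python) =====
-- from typing import List, Tuple, Optional, Any, Dict
--
-- def _find_time_column(headers: List[str]) -> Tuple[Optional[int], Optional[str]]:
--     """Return (index, key) where key is 'lap' or 'time', or (None,None) if not found."""
--     if not headers:
--         return None, None
--     lowers = [h.lower() for h in headers]
--     lap_candidates = ["lap", "lap_number", "lap no", "lap#"]
--     time_candidates = [
--         "time", "timestamp", "time_ms", "time_s", "time (s)", "t", "t[s]", "seconds", "ms", "millis"
--     ]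
--     for name in lap_candidates:
--         for i, h in enumerate(lowers):
--             if name == h or name in h:
--                 return i, "lap"
--     for name in time_candidates:
--         for i, h in enumerate(lowers):
--             if name == h or name in h:
--                 return i, "time"
--     return None, None
-- ===== SOURCE B (Python) =====
-- def _find_time_column(headers):
--     """Return (index, key) where key is 'lap' or 'time', or (None,None) if not found."""
--     if not headers:
--         return None, None
--     lowers = [h.lower() for h in headers]
--     groups = (
--         (["lap", "lap_number", "lap no", "lap#"], "lap"),
--         (["time", "timestamp", "time_ms", "time_s", "time (s)", "t", "t[s]", "seconds", "ms", "millis"], "time"),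
--     )
--     for cands, key in groups:
--         best = None  # lexicographically smallest (candidate_rank, header_index)
--         for i, h in enumerate(lowers):
--             rank = next((r for r, n in enumerate(cands) if n in h), None)
--             if rank is None:
--                 continue
--             if best is None or (rank, i) < best:
--                 best = (rank, i)
--         if best is not None:
--             return best[1], key
--     return None, None
-- ===== Notes on version B (the rewrite author's own statement) =====
-- stated objective: alternative
-- what changed: Replaced the candidate-major nested early-return scan with a single header-major pass per group that keeps the lexicographically smallest (candidate_rank, header_index) key.
import Mathlib
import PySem

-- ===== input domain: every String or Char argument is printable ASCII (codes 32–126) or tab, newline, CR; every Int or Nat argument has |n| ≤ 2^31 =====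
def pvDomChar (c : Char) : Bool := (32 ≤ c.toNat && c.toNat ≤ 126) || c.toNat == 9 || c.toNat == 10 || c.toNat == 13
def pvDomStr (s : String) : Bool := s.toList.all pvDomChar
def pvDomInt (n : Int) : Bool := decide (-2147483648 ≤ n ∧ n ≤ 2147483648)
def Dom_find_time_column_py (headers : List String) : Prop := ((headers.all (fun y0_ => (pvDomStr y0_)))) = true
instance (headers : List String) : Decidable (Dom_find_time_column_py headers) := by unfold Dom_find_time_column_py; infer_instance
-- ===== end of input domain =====

-- B replaces A's candidate-major nested early-return scan by a single header-major pass per group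
-- keeping the lexicographically smallest (candidate_rank, header_index) key (objective: alternative).

-- shared candidate-name constants (data only, used by both ports)
def ftcLap : List String := ["lap", "lap_number", "lap no", "lap#"]
def ftcTime : List String :=
  ["time", "timestamp", "time_ms", "time_s", "time (s)", "t", "t[s]", "seconds", "ms", "millis"]

-- ===== PORT A =====
-- Python's 'name == h or name in h'
def ftcPred (name h : String) : Bool := name == h || PySem.Str.isIn name h

-- 'for name in candidates: for i, h in enumerate(lowers): if …: return i'
def ftcGroup : List String → List String → Option Nat
  | [], _ => none
  | n :: rest, lowers =>
    match lowers.findIdx? (ftcPred n) with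
    | some i => some i
    | none => ftcGroup rest lowers

def find_time_column_py (headers : List String) : Option Int × Option String :=
  if headers.isEmpty then (none, none)
  else
    let lowers := headers.map PySem.Str.lower
    match ftcGroup ftcLap lowers with
    | some i => (some (i : Int), some "lap")
    | none =>
      match ftcGroup ftcTime lowers with
      | some i => (some (i : Int), some "time")
      | none => (none, none)

-- ===== PORT B =====
-- rank = next((r for r, n in enumerate(cands) if n in h), None)
def ftcRank (cands : List String) (h : String) : Option Nat :=
  cands.findIdx? (fun n => PySem.Str.isIn n h)

-- one step of the header-major loop: keep the lex-smallest (rank, header_index) key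
-- (the if-condition is Python's tuple comparison '(rank, i) < best', written out)
def ftcStep (cands : List String) (best : Option (Nat × Nat)) (hi : String × Nat) : Option (Nat × Nat) :=
  match ftcRank cands hi.1 with
  | none => best
  | some r =>
    match best with
    | none => some (r, hi.2)
    | some b => if r < b.1 ∨ (r = b.1 ∧ hi.2 < b.2) then some (r, hi.2) else some b

def ftcBest (cands lowers : List String) : Option (Nat × Nat) :=
  lowers.zipIdx.foldl (ftcStep cands) none

def find_time_column_py_alt (headers : List String) : Option Int × Option String :=
  match headers with
  | [] => (none, none)
  | _ =>
    let lowers := headers.map PySem.Str.lower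
    match ftcBest ftcLap lowers with
    | some b => (some (b.2 : Int), some "lap")
    | none =>
      match ftcBest ftcTime lowers with
      | some b => (some (b.2 : Int), some "time")
      | none => (none, none)

-- ===== PRECONDITION & SPEC =====
def Spec_find_time_column_py (headers : List String) (out : Option Int × Option String) : Prop := out = find_time_column_py_alt headers
instance (headers : List String) (out : Option Int × Option String) : Decidable (Spec_find_time_column_py headers out) := by unfold Spec_find_time_column_py; infer_instance

-- ===== CLAIM (what is proved, stated in full; the proofs are below) =====
def Claim_equal_find_time_column_py : Prop := ∀ (headers : List String), Dom_find_time_column_py headers → Spec_find_time_column_py headers (find_time_column_py headers)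

-- ===== LEMMAS AND PROOFS =====

-- 'name == h or name in h' is just the substring test (equality is a special case)
theorem ftcPred_eq (n h : String) : ftcPred n h = PySem.Str.isIn n h := by
  unfold ftcPred
  cases hb : (n == h)
  · simp
  · have hnh : n = h := eq_of_beq hb
    subst hnh
    simp only [Bool.true_or]
    have : PySem.Str.isIn n n = true := by
      rw [PySem.Str.isIn_iff_infix]
    rw [this]

-- the empty candidate list matches nothing
theorem ftcStep_nil (b : Option (Nat × Nat)) (p : String × Nat) : ftcStep [] b p = b := by
  simp [ftcStep, ftcRank]

theorem foldl_ftcStep_nil (l : List (String × Nat)) (b : Option (Nat × Nat)) :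
    l.foldl (ftcStep []) b = b := by
  induction l generalizing b with
  | nil => rfl
  | cons p t ih => rw [List.foldl_cons, ftcStep_nil]; exact ih b

-- once best = (0, i0), later headers (index > i0) never replace it
theorem foldl_ftcStep_keep (cands : List String) (i0 : Nat) (l : List (String × Nat))
    (hgt : ∀ p ∈ l, i0 < p.2) :
    l.foldl (ftcStep cands) (some (0, i0)) = some (0, i0) := by
  induction l with
  | nil => rfl
  | cons p t ih =>
    have hp := hgt p (by simp)
    have hstep : ftcStep cands (some (0, i0)) p = some (0, i0) := by
      cases hr : ftcRank cands p.1 with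
      | none => simp [ftcStep, hr]
      | some r =>
        simp only [ftcStep, hr]
        have hcond : ¬ (r < 0 ∨ (r = 0 ∧ p.2 < i0)) := by omega
        rw [if_neg hcond]
    rw [List.foldl_cons, hstep]
    exact ih (fun q hq => hgt q (by simp [hq]))

-- rank for (c :: rest) when c does not match: shift the rest-rank by one
theorem ftcRank_cons_false (c : String) (rest : List String) (h : String)
    (hc : PySem.Str.isIn c h = false) :
    ftcRank (c :: rest) h = (ftcRank rest h).map (· + 1) := by
  have hc' : PySem.Chars.isIn c.toList h.toList = false := by simpa using hc
  simp [ftcRank, List.findIdx?_cons, hc']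

-- the shift (r, i) ↦ (r+1, i) commutes with the header-major fold
theorem foldl_ftcStep_shift (c : String) (rest : List String) (l : List (String × Nat))
    (hc : ∀ p ∈ l, PySem.Str.isIn c p.1 = false) (b : Option (Nat × Nat)) :
    l.foldl (ftcStep (c :: rest)) (b.map (fun x => (x.1 + 1, x.2))) =
      (l.foldl (ftcStep rest) b).map (fun x => (x.1 + 1, x.2)) := by
  induction l generalizing b with
  | nil => rfl
  | cons p t ih =>
    have hcp := hc p (by simp)
    have hstep : ftcStep (c :: rest) (b.map (fun x => (x.1 + 1, x.2))) p =
        (ftcStep rest b p).map (fun x => (x.1 + 1, x.2)) := by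
      cases hr : ftcRank rest p.1 with
      | none => simp [ftcStep, ftcRank_cons_false c rest p.1 hcp, hr]
      | some r =>
        cases b with
        | none => simp [ftcStep, ftcRank_cons_false c rest p.1 hcp, hr]
        | some x =>
          simp only [ftcStep, ftcRank_cons_false c rest p.1 hcp, hr,
            Option.map_some]
          by_cases hcmp : r < x.1 ∨ (r = x.1 ∧ p.2 < x.2)
          · have hcmp' : r + 1 < x.1 + 1 ∨ (r + 1 = x.1 + 1 ∧ p.2 < x.2) := by omega
            rw [if_pos hcmp, if_pos hcmp']
            rfl
          · have hcmp' : ¬ (r + 1 < x.1 + 1 ∨ (r + 1 = x.1 + 1 ∧ p.2 < x.2)) := by omega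
            rw [if_neg hcmp, if_neg hcmp']
            rfl
    rw [List.foldl_cons, List.foldl_cons, hstep]
    exact ih (fun q hq => hc q (by simp [hq])) _

-- starting from a best of rank ≥ 1 (or none): when c's first match in lowers is at
-- relative position j, the header-major fold over lowers.zipIdx k ends at (0, k + j)
theorem foldl_ftcStep_hit (c : String) (rest : List String) :
    ∀ (lowers : List String) (k j : Nat) (b : Option (Nat × Nat)),
      (∀ x, b = some x → 1 ≤ x.1) →
      lowers.findIdx? (fun h => PySem.Str.isIn c h) = some j →
      (lowers.zipIdx k).foldl (ftcStep (c :: rest)) b = some (0, k + j) := by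
  intro lowers
  induction lowers with
  | nil => intro k j b _ hfind; simp at hfind
  | cons h t ih =>
    intro k j b hb hfind
    rw [List.findIdx?_cons] at hfind
    by_cases hch : PySem.Str.isIn c h = true
    · have hch' : PySem.Chars.isIn c.toList h.toList = true := by simpa using hch
      have hj : j = 0 := by
        rw [if_pos hch] at hfind
        exact (Option.some_inj.mp hfind).symm
      subst hj
      have hrank : ftcRank (c :: rest) h = some 0 := by
        simp [ftcRank, List.findIdx?_cons, hch']
      have hstep : ftcStep (c :: rest) b (h, k) = some (0, k) := by
        cases b with
        | none => simp [ftcStep, hrank]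
        | some x =>
          have hx := hb x rfl
          simp only [ftcStep, hrank]
          have hcond : 0 < x.1 ∨ (0 = x.1 ∧ k < x.2) := by omega
          rw [if_pos hcond]
      rw [List.zipIdx_cons, List.foldl_cons, hstep,
        foldl_ftcStep_keep (c :: rest) k (t.zipIdx (k + 1))
          (fun p hp => by obtain ⟨hk, _, _⟩ := List.mem_zipIdx hp; omega)]
      norm_num
    · have hchf : PySem.Str.isIn c h = false := by
        cases hv : PySem.Str.isIn c h
        · rfl
        · exact absurd hv hch
      rw [if_neg hch, Option.map_eq_some_iff] at hfind
      obtain ⟨j', hj', hjj⟩ := hfind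
      subst hjj
      -- the new accumulator after this step still has rank ≥ 1 (or came from b)
      have hb' : ∀ x, ftcStep (c :: rest) b (h, k) = some x → 1 ≤ x.1 := by
        intro x hx
        cases hr : ftcRank rest h with
        | none =>
          simp only [ftcStep, ftcRank_cons_false c rest h hchf, hr, Option.map_none] at hx
          exact hb x hx
        | some r =>
          cases b with
          | none =>
            simp only [ftcStep, ftcRank_cons_false c rest h hchf, hr, Option.map_some] at hx
            injection hx with h1
            subst h1
            simp
          | some y =>
            simp only [ftcStep, ftcRank_cons_false c rest h hchf, hr, Option.map_some] at hx
            by_cases hcmp : r + 1 < y.1 ∨ (r + 1 = y.1 ∧ k < y.2)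
            · rw [if_pos hcmp] at hx
              injection hx with h1
              subst h1
              simp
            · rw [if_neg hcmp] at hx
              exact hb x hx
      rw [List.zipIdx_cons, List.foldl_cons,
        ih (k + 1) j' (ftcStep (c :: rest) b (h, k)) hb' hj']
      have harith : k + 1 + j' = k + (j' + 1) := by omega
      rw [harith]

-- main lemma: the candidate-major scan returns the index of the lex-min (rank, index) key
theorem ftcGroup_eq_best (cands lowers : List String) :
    ftcGroup cands lowers = (ftcBest cands lowers).map Prod.snd := by
  induction cands with
  | nil => simp [ftcGroup, ftcBest, foldl_ftcStep_nil]
  | cons c rest ih =>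
    have hpred : lowers.findIdx? (ftcPred c) = lowers.findIdx? (fun h => PySem.Str.isIn c h) := by
      congr 1
      funext h
      exact ftcPred_eq c h
    show (match lowers.findIdx? (ftcPred c) with
          | some i => some i
          | none => ftcGroup rest lowers) = (ftcBest (c :: rest) lowers).map Prod.snd
    rw [hpred]
    cases hfind : lowers.findIdx? (fun h => PySem.Str.isIn c h) with
    | some j =>
      have hbest : ftcBest (c :: rest) lowers = some (0, j) := by
        unfold ftcBest
        have := foldl_ftcStep_hit c rest lowers 0 j none (by intro x hx; simp at hx) hfind
        simpa using this
      rw [hbest]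
      rfl
    | none =>
      have hall : ∀ p ∈ lowers.zipIdx, PySem.Str.isIn c p.1 = false := by
        intro p hp
        obtain ⟨_, hlt, heq⟩ := List.mem_zipIdx hp
        have hmem : p.1 ∈ lowers := by
          rw [heq]; exact List.getElem_mem _
        have := List.findIdx?_eq_none_iff.mp hfind p.1 hmem
        simpa using this
      have hshift : ftcBest (c :: rest) lowers =
          (ftcBest rest lowers).map (fun x => (x.1 + 1, x.2)) := by
        unfold ftcBest
        have := foldl_ftcStep_shift c rest lowers.zipIdx hall none
        simpa using this
      rw [hshift, ih]
      cases ftcBest rest lowers <;> rfl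

theorem find_time_column_eq (headers : List String) :
    find_time_column_py headers = find_time_column_py_alt headers := by
  cases headers with
  | nil => rfl
  | cons h t =>
    unfold find_time_column_py find_time_column_py_alt
    simp only [List.isEmpty_cons, Bool.false_eq_true, if_false]
    rw [ftcGroup_eq_best, ftcGroup_eq_best]
    cases ftcBest ftcLap ((h :: t).map PySem.Str.lower) with
    | some b => rfl
    | none =>
      cases ftcBest ftcTime ((h :: t).map PySem.Str.lower) <;> rfl

-- ===== VERDICT (by name: the statement is the Claim_ definition above) =====
theorem find_time_column_py_spec : Claim_equal_find_time_column_py := by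
  intro headers _
  exact find_time_column_eq headers
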